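-- pv_equiv track=rewrite | github.com/mdecelle/advent-of-code | puzzle_2/part_1.py | add_duplicates
-- ===== SOURCE A (Python) =====
-- def add_duplicates(start, end):
--   def add_range(s, e):
--     diff = e - s
--     return s * (diff + 1) + ((diff * (diff + 1)) // 2)
--   def dup_val(v, l):
--     return v * (10 ** l) + v
--   start_s, end_s = str(start), str(end)
--   total = 0
--   while len(start_s) < len(end_s):
--     temp_end = int(''.join(['9'] * len(start_s)))
--     total += dup_val(add_range(start, temp_end), len(start_s))
--     start = temp_end + 1
--     start_s = str(temp_end + 1)
--   total += dup_val(add_range(start, end), len(start_s))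
--   return total
-- ===== SOURCE B (Python) =====
-- def add_duplicates(start, end):
--     def T(n):
--         # triangular number: sum of 1..n (works for any integer n)
--         return n * (n + 1) // 2
--
--     def dup(lo, hi, w):
--         # duplicated-sum of the block lo..hi, all written with w characters:
--         # (sum of the block) * (10**w + 1), the sum via triangular-number difference
--         return (T(hi) - T(lo - 1)) * (10 ** w + 1)
--
--     def mid(a, b):
--         # sum of dup(10**(k-1), 10**k - 1, k) for k = a..b, in closed form:
--         # each term is (99*10**(3k-2) + 9*10**(2k-2) - 9*10**(k-1)) / 2, so the
--         # whole middle is three geometric series, summed without any loop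
--         A3 = (10 ** (3 * b + 1) - 10 ** (3 * a - 2)) // 999
--         A2 = (10 ** (2 * b) - 10 ** (2 * a - 2)) // 99
--         A1 = (10 ** b - 10 ** (a - 1)) // 9
--         return (99 * A3 + 9 * A2 - 9 * A1) // 2
--
--     ws, we = len(str(start)), len(str(end))
--     if ws >= we:
--         return dup(start, end, ws)
--     return dup(start, 10 ** ws - 1, ws) + mid(ws + 1, we - 1) + dup(10 ** (we - 1), end, we)
-- ===== Notes on version B (the rewrite author's own statement) =====
-- stated objective: alternative
-- what changed: B replaces A's string-driven while loop over digit-length buckets (one Gauss sum per iteration, start mutated through the nine-boundaries) by a single closed-form expression: triangular-number differences for the two edge blocks and three loop-free geometric-series sums (exact divisions by 999, 99 and 9) covering all full nine-blocks in the middle.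
import Mathlib
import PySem

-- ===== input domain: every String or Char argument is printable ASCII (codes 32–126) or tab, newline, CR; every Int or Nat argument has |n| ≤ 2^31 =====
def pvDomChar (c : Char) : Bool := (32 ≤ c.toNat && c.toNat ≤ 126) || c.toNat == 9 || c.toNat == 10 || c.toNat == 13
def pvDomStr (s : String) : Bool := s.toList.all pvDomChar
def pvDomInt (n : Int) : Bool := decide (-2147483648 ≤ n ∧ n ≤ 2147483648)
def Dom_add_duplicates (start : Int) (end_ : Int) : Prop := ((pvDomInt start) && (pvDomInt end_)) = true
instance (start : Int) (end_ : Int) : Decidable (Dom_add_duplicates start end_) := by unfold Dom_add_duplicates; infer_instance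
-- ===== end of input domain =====

-- B replaces A's string-driven bucket loop by one loop-free closed form: triangular-number
-- differences for the two edge blocks and three geometric-series sums for the middle blocks.

-- ===== PORT A =====
def pvAddRange (s e : Int) : Int :=
  let diff := e - s
  s * (diff + 1) + PySem.Int.floordiv (diff * (diff + 1)) 2

def pvDupVal (v : Int) (l : Nat) : Int := v * (10 ^ l) + v

-- the while loop; fuel only makes the recursion total (it is never exhausted: each
-- iteration strictly grows start_s, and fuel starts at end_s.length ≥ the iteration count)
def pvALoop : Nat → Int → List Char → Int → List Char → Int → Int
  | 0, start, start_s, end_, _end_s, total =>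
      -- fuel exhausted: exit the loop (with the fuel above this is only reached with the
      -- loop condition false, where Python exits with exactly this value)
      total + pvDupVal (pvAddRange start end_) start_s.length
  | f + 1, start, start_s, end_, end_s, total =>
      if start_s.length < end_s.length then
        -- ''.join(['9'] * len(start_s)) is the string of len(start_s) nines; int() on it cannot raise
        let temp_end := (PySem.Int.ofStr? (String.ofList (List.replicate start_s.length '9'))).getD 0
        pvALoop f (temp_end + 1) (PySem.Int.toChars (temp_end + 1)) end_ end_s
          (total + pvDupVal (pvAddRange start temp_end) start_s.length)
      else
        total + pvDupVal (pvAddRange start end_) start_s.length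

def add_duplicates (start : Int) (end_ : Int) : Int :=
  let start_s := PySem.Int.toChars start
  let end_s := PySem.Int.toChars end_
  pvALoop end_s.length start start_s end_ end_s 0

-- ===== PORT B =====
-- T(n) = n*(n+1)//2
def pvT (n : Int) : Int := PySem.Int.floordiv (n * (n + 1)) 2

-- dup(lo, hi, w) = (T(hi) - T(lo-1)) * (10**w + 1)
def pvDup (lo hi : Int) (w : Nat) : Int := (pvT hi - pvT (lo - 1)) * (10 ^ w + 1)

-- mid(a, b): the three geometric series; B only calls it with a = ws+1 ≥ 2, b = we-1 ≥ 1,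
-- where the Python exponents 3a-2, 2a-2, a-1 are the nonnegative numbers ported here
def pvMid (a b : Nat) : Int :=
  let A3 := PySem.Int.floordiv (10 ^ (3 * b + 1) - 10 ^ (3 * a - 2)) 999
  let A2 := PySem.Int.floordiv (10 ^ (2 * b) - 10 ^ (2 * a - 2)) 99
  let A1 := PySem.Int.floordiv (10 ^ b - 10 ^ (a - 1)) 9
  PySem.Int.floordiv (99 * A3 + 9 * A2 - 9 * A1) 2

def add_duplicates_alt (start : Int) (end_ : Int) : Int :=
  let ws := (PySem.Int.toChars start).length
  let we := (PySem.Int.toChars end_).length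
  if we ≤ ws then pvDup start end_ ws
  else pvDup start (10 ^ ws - 1) ws + pvMid (ws + 1) (we - 1) + pvDup (10 ^ (we - 1)) end_ we

-- ===== PRECONDITION & SPEC =====
def Spec_add_duplicates (start : Int) (end_ : Int) (out : Int) : Prop := out = add_duplicates_alt start end_
instance (start : Int) (end_ : Int) (out : Int) : Decidable (Spec_add_duplicates start end_ out) := by unfold Spec_add_duplicates; infer_instance

-- ===== CLAIM (what is proved, stated in full; the proofs are below) =====
def Claim_equal_add_duplicates : Prop := ∀ (start : Int) (end_ : Int), Dom_add_duplicates start end_ → Spec_add_duplicates start end_ (add_duplicates start end_)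

-- ===== LEMMAS AND PROOFS =====

theorem pv_fd_zero : PySem.Int.floordiv 0 2 = 0 := by
  rw [PySem.Int.floordiv_eq_ediv_of_pos (by norm_num : (0:Int) < 2)]
  simp

-- floordiv peels a multiple of a positive divisor
theorem pv_fd_peel (d c x : Int) (hd : 0 < d) :
    PySem.Int.floordiv (d * c + x) d = c + PySem.Int.floordiv x d := by
  rw [PySem.Int.floordiv_eq_ediv_of_pos hd, PySem.Int.floordiv_eq_ediv_of_pos hd,
    show d * c + x = x + c * d by ring, Int.add_mul_ediv_right _ _ (by omega : d ≠ 0)]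
  ring

-- 2 * T(n) = n*(n+1)
theorem pv_two_T (n : Int) : 2 * pvT n = n * (n + 1) := by
  obtain ⟨r, hr⟩ := Int.even_mul_succ_self n
  unfold pvT
  rw [hr, show r + r = 2 * r + 0 by ring, pv_fd_peel 2 r 0 (by norm_num), pv_fd_zero]
  ring

-- B's triangular-difference block sum is A's dup_val(add_range(lo, hi), w)
theorem pvAddRange_eq (s e : Int) :
    pvAddRange s e = s * ((e - s) + 1) + PySem.Int.floordiv ((e - s) * ((e - s) + 1)) 2 := rfl

theorem pv_dup_eq (lo hi : Int) (w : Nat) :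
    pvDup lo hi w = pvDupVal (pvAddRange lo hi) w := by
  rw [pvAddRange_eq]
  unfold pvDup pvDupVal
  have h1 := pv_two_T hi
  have h2 := pv_two_T (lo - 1)
  obtain ⟨r, hr⟩ := Int.even_mul_succ_self (hi - lo)
  have hfd : PySem.Int.floordiv ((hi - lo) * (hi - lo + 1)) 2 = r := by
    rw [hr, show r + r = 2 * r + 0 by ring, pv_fd_peel 2 r 0 (by norm_num), pv_fd_zero]
    ring
  rw [hfd]
  have key : pvT hi - pvT (lo - 1) = lo * ((hi - lo) + 1) + r := by
    have h3 : 2 * (pvT hi - pvT (lo - 1)) = 2 * (lo * ((hi - lo) + 1) + r) := by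
      have hr2 : 2 * r = (hi - lo) * (hi - lo + 1) := by omega
      linear_combination h1 - h2 - hr2
    omega
  rw [key]
  ring

-- empty middle: mid(a+1, a) = 0
theorem pv_mid_empty (a : Nat) : pvMid (a + 1) a = 0 := by
  unfold pvMid
  simp only [show 3 * (a + 1) - 2 = 3 * a + 1 by omega, show 2 * (a + 1) - 2 = 2 * a by omega,
    Nat.add_sub_cancel, sub_self]
  simp [PySem.Int.floordiv]

-- peeling the lowest full block out of the middle closed form
theorem pv_mid_peel (a b : Nat) :
    pvMid (a + 1) b = pvDup (10 ^ a) (10 ^ (a + 1) - 1) (a + 1) + pvMid (a + 2) b := by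
  unfold pvMid
  simp only [show 3 * (a + 1) - 2 = 3 * a + 1 by omega, show 2 * (a + 1) - 2 = 2 * a by omega,
    Nat.add_sub_cancel, show 3 * (a + 2) - 2 = 3 * a + 4 by omega,
    show 2 * (a + 2) - 2 = 2 * a + 2 by omega, show a + 2 - 1 = a + 1 by omega]
  have e3 : (10:Int) ^ (3 * b + 1) - 10 ^ (3 * a + 1) =
      999 * 10 ^ (3 * a + 1) + (10 ^ (3 * b + 1) - 10 ^ (3 * a + 4)) := by
    rw [show 3 * a + 4 = (3 * a + 1) + 3 by omega, pow_add]; ring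
  have e2 : (10:Int) ^ (2 * b) - 10 ^ (2 * a) =
      99 * 10 ^ (2 * a) + (10 ^ (2 * b) - 10 ^ (2 * a + 2)) := by
    rw [show 2 * a + 2 = (2 * a) + 2 by omega, pow_add]; ring
  have e1 : (10:Int) ^ b - 10 ^ a = 9 * 10 ^ a + (10 ^ b - 10 ^ (a + 1)) := by
    rw [pow_add]; ring
  rw [e3, e2, e1, pv_fd_peel 999 _ _ (by norm_num), pv_fd_peel 99 _ _ (by norm_num),
    pv_fd_peel 9 _ _ (by norm_num)]
  have hdup : 99 * (10:Int) ^ (3 * a + 1) + 9 * 10 ^ (2 * a) - 9 * 10 ^ a =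
      2 * pvDup (10 ^ a) (10 ^ (a + 1) - 1) (a + 1) := by
    unfold pvDup
    have h1 := pv_two_T ((10:Int) ^ (a + 1) - 1)
    have h2 := pv_two_T ((10:Int) ^ a - 1)
    have expand : 2 * ((pvT ((10:Int) ^ (a + 1) - 1) - pvT ((10:Int) ^ a - 1)) * (10 ^ (a + 1) + 1))
        = (((10:Int) ^ (a + 1) - 1) * 10 ^ (a + 1) - ((10:Int) ^ a - 1) * 10 ^ a) * (10 ^ (a + 1) + 1) := by
      linear_combination ((10:Int) ^ (a + 1) + 1) * h1 - ((10:Int) ^ (a + 1) + 1) * h2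
    rw [expand]
    rw [show 3 * a + 1 = a + a + a + 1 by omega, show 2 * a = a + a by omega, pow_add, pow_add, pow_add, pow_add]
    ring
  have hsplit : ∀ A3' A2' A1' : Int,
      99 * (10 ^ (3 * a + 1) + A3') + 9 * (10 ^ (2 * a) + A2') - 9 * (10 ^ a + A1')
        = 2 * pvDup (10 ^ a) (10 ^ (a + 1) - 1) (a + 1) + (99 * A3' + 9 * A2' - 9 * A1') := by
    intro A3' A2' A1'
    rw [← hdup]
    ring
  rw [hsplit, pv_fd_peel 2 _ _ (by norm_num)]

-- A-side string lemmas (length of str(n), int of a string of nines)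

-- length of Nat.toDigitsCore is log + 1
theorem pv_toDigitsCore_len (f : Nat) : ∀ (n : Nat) (ds : List Char), n < f →
    (Nat.toDigitsCore 10 f n ds).length = ds.length + (Nat.log 10 n + 1) := by
  induction f with
  | zero => intro n ds h; omega
  | succ f ih =>
    intro n ds h
    rw [Nat.toDigitsCore]
    by_cases h10 : n / 10 = 0
    · have : n < 10 := by omega
      simp [h10, Nat.log_eq_zero_iff.mpr (Or.inl this)]
    · simp only [h10, if_false]
      have hlt : n / 10 < f := by
        have := Nat.div_lt_self (by omega : 0 < n) (by omega : 1 < 10)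
        omega
      rw [ih (n / 10) _ hlt]
      have hn : 10 ≤ n := by
        by_contra hc
        exact h10 (Nat.div_eq_of_lt (by omega))
      have := Nat.log_div_base 10 n
      have hpos : 1 ≤ Nat.log 10 n := Nat.log_pos (by omega) hn
      simp only [List.length_cons]
      omega

-- length of str(n) for nonnegative n
theorem pv_len_toChars (n : Int) (h : 0 ≤ n) :
    (PySem.Int.toChars n).length = Nat.log 10 n.toNat + 1 := by
  unfold PySem.Int.toChars
  rw [if_neg (by omega)]
  unfold Nat.toDigits
  have h2 := pv_toDigitsCore_len (n.toNat + 1) n.toNat [] (Nat.lt_succ_self _)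
  simpa using h2

-- length of str(n) for negative n ('-' plus the digits of |n|)
theorem pv_len_toChars_neg (n : Int) (h : n < 0) :
    (PySem.Int.toChars n).length = Nat.log 10 n.natAbs + 2 := by
  unfold PySem.Int.toChars
  rw [if_pos h]
  unfold Nat.toDigits
  have h2 := pv_toDigitsCore_len (n.natAbs + 1) n.natAbs [] (Nat.lt_succ_self _)
  simp only [List.length_cons]
  simp at h2
  omega

-- int('9' * l) = 10^l - 1 for the digit counts reachable inside the 2^31 domain
theorem pv_nines (l : Nat) (h1 : 1 ≤ l) (h2 : l ≤ 10) :
    (PySem.Int.ofStr? (String.ofList (List.replicate l '9'))).getD 0 = 10 ^ l - 1 := by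
  interval_cases l <;> decide

-- length of str(10^k)
theorem pv_len_pow (k : Nat) : (PySem.Int.toChars ((10:Int) ^ k)).length = k + 1 := by
  rw [pv_len_toChars _ (by positivity),
    show ((10:Int) ^ k).toNat = 10 ^ k by
      rw [show (10:Int) ^ k = ((10 ^ k : Nat) : Int) by push_cast; ring, Int.toNat_natCast],
    Nat.log_pow (by norm_num)]

-- B's closed form peels exactly A's first bucket when len(start) < len(end)
theorem pv_alt_split (start end_ : Int) (ls : Nat)
    (hls : (PySem.Int.toChars start).length = ls) (hls1 : 1 ≤ ls)
    (hlt : ls < (PySem.Int.toChars end_).length) :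
    add_duplicates_alt start end_
      = pvDupVal (pvAddRange start (10 ^ ls - 1)) ls + add_duplicates_alt ((10:Int) ^ ls) end_ := by
  obtain ⟨a, ha⟩ : ∃ a, ls = a + 1 := ⟨ls - 1, by omega⟩
  set le := (PySem.Int.toChars end_).length with hle
  unfold add_duplicates_alt
  simp only [← hle, hls, pv_len_pow]
  rw [if_neg (by omega)]
  by_cases hcase : le ≤ ls + 1
  · have hle2 : le = ls + 1 := by omega
    rw [if_pos (by omega)]
    rw [hle2, Nat.add_sub_cancel, ha, pv_mid_empty, pv_dup_eq]
    ring
  · rw [if_neg (by omega)]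
    rw [ha, pv_mid_peel (a + 1) (le - 1)]
    simp only [pv_dup_eq, show a + 1 + 1 + 1 = a + 1 + 2 by omega]
    ring

-- main loop lemma: A's fueled while loop computes B's closed form
theorem pv_loop (end_ : Int) (hle : (PySem.Int.toChars end_).length ≤ 11) :
    ∀ (fuel : Nat) (start total : Int),
    (PySem.Int.toChars end_).length ≤ fuel + (PySem.Int.toChars start).length →
    pvALoop fuel start (PySem.Int.toChars start) end_ (PySem.Int.toChars end_) total
      = total + add_duplicates_alt start end_ := by
  intro fuel
  induction fuel with
  | zero =>
    intro start total hfuel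
    rw [pvALoop]
    unfold add_duplicates_alt
    rw [if_pos (by omega)]
    rw [pv_dup_eq]
  | succ f ih =>
    intro start total hfuel
    rw [pvALoop]
    by_cases hcond : (PySem.Int.toChars start).length < (PySem.Int.toChars end_).length
    · rw [if_pos hcond]
      set ls := (PySem.Int.toChars start).length with hls
      have hls1 : 1 ≤ ls := by
        rw [hls]
        by_cases h0 : 0 ≤ start
        · rw [pv_len_toChars start h0]; omega
        · rw [pv_len_toChars_neg start (by omega)]; omega
      rw [pv_nines ls hls1 (by omega)]
      show pvALoop f (10 ^ ls - 1 + 1) (PySem.Int.toChars (10 ^ ls - 1 + 1)) end_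
          (PySem.Int.toChars end_) (total + pvDupVal (pvAddRange start (10 ^ ls - 1)) ls)
        = total + add_duplicates_alt start end_
      rw [show (10 : Int) ^ ls - 1 + 1 = 10 ^ ls by ring]
      rw [ih ((10 : Int) ^ ls) (total + pvDupVal (pvAddRange start (10 ^ ls - 1)) ls)
        (by rw [pv_len_pow]; omega)]
      rw [pv_alt_split start end_ ls rfl hls1 hcond]
      ring
    · rw [if_neg hcond]
      unfold add_duplicates_alt
      rw [if_pos (by omega)]
      rw [pv_dup_eq]

-- ===== VERDICT (by name: the statement is the Claim_ definition above) =====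
theorem add_duplicates_spec : Claim_equal_add_duplicates := by
  intro start end_ hdom
  unfold Spec_add_duplicates add_duplicates
  simp only [Dom_add_duplicates, pvDomInt, Bool.and_eq_true, decide_eq_true_eq] at hdom
  have hle : (PySem.Int.toChars end_).length ≤ 11 := by
    by_cases h : 0 ≤ end_
    · rw [pv_len_toChars end_ h]
      by_cases h0 : end_.toNat = 0
      · simp [h0]
      · have := Nat.log_lt_of_lt_pow h0 (show end_.toNat < 10 ^ 10 by omega)
        omega
    · rw [pv_len_toChars_neg end_ (by omega)]
      have h0 : end_.natAbs ≠ 0 := by omega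
      have := Nat.log_lt_of_lt_pow h0 (show end_.natAbs < 10 ^ 10 by omega)
      omega
  have h := pv_loop end_ hle (PySem.Int.toChars end_).length start 0 (by omega)
  rw [h]
  ring
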